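-- pv_equiv track=rewrite | github.com/vaibhav-jain-dev/learning-algo | problems/200-must-solve/arrays/19-largest-range/similar/02-count-distinct-ranges/python_code.py | count_ranges_with_hash_set
-- ===== SOURCE A (Python) =====
-- from typing import List, Tuple
--
-- def count_ranges_with_hash_set(nums: List[int]) -> int:
--     """
--     Count ranges using hash set (alternative approach).
--
--     Args:
--         nums: List of integers
--
--     Returns:
--         Number of distinct consecutive ranges
--     """
--     if not nums:
--         return 0
--
--     num_set = set(nums)
--     range_count = 0
--
--     for num in num_set:
--         # Count only range starts (where num - 1 is not in set)
--         if num - 1 not in num_set: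
--             range_count += 1
--
--     return range_count
-- ===== SOURCE B (Python) =====
-- def count_ranges_with_hash_set(nums):
--     sorted_unique = sorted(set(nums))
--     if not sorted_unique:
--         return 0
--     range_count = 1
--     for prev, cur in zip(sorted_unique, sorted_unique[1:]):
--         if cur - prev > 1:
--             range_count += 1
--     return range_count
-- ===== Notes on version B (the rewrite author's own statement) =====
-- stated objective: idiomatic
-- what changed: Replaces the hash-set scan counting elements without a predecessor with a sort of the distinct values followed by counting gaps greater than 1 between adjacent pairs (starting from 1 for a nonempty list).
import Mathlib
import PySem

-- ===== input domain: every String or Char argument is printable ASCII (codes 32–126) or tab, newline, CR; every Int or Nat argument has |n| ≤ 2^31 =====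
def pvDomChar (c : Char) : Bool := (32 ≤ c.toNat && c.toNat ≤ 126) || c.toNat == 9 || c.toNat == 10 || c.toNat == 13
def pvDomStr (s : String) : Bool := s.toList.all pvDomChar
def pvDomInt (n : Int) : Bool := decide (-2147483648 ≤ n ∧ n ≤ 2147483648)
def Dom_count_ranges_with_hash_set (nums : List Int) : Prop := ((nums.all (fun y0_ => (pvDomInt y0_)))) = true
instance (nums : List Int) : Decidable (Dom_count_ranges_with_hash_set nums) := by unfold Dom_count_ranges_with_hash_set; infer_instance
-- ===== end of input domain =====

-- B replaces A's hash-set "no predecessor" scan by sorting the distinct values and counting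
-- adjacent gaps > 1, starting from 1 for a nonempty list (alternative algorithm, same result).

-- ===== PORT A =====
def count_ranges_with_hash_set (nums : List Int) : Int :=
  if nums = [] then 0
  else
    let num_set : PySem.Set Int := PySem.Set.ofList nums
    num_set.foldl
      (fun range_count num =>
        if PySem.Set.contains num_set (num - 1) then range_count else range_count + 1) 0

-- ===== PORT B =====
def count_ranges_with_hash_set_alt (nums : List Int) : Int :=
  let sorted_unique := PySem.List.sorted (PySem.Set.ofList nums) (fun x => x) false
  if sorted_unique = [] then 0
  else
    -- for prev, cur in zip(sorted_unique, sorted_unique[1:])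
    (sorted_unique.zip (PySem.List.slice sorted_unique (some 1) none)).foldl
      (fun range_count p => if p.2 - p.1 > 1 then range_count + 1 else range_count) 1

-- ===== PRECONDITION & SPEC =====
def Spec_count_ranges_with_hash_set (nums : List Int) (out : Int) : Prop := out = count_ranges_with_hash_set_alt nums
instance (nums : List Int) (out : Int) : Decidable (Spec_count_ranges_with_hash_set nums out) := by unfold Spec_count_ranges_with_hash_set; infer_instance

-- ===== CLAIM (what is proved, stated in full; the proofs are below) =====
def Claim_equal_count_ranges_with_hash_set : Prop := ∀ (nums : List Int), Dom_count_ranges_with_hash_set nums → Spec_count_ranges_with_hash_set nums (count_ranges_with_hash_set nums)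

-- ===== LEMMAS AND PROOFS =====

-- A's loop counts the elements whose predecessor is absent from the set.
theorem foldA_countP (s : List Int) : ∀ (l : List Int) (c : Int),
    l.foldl (fun rc num => if PySem.Set.contains s (num - 1) then rc else rc + 1) c
      = c + (l.countP (fun num => !PySem.Set.contains s (num - 1)) : Int) := by
  intro l
  induction l with
  | nil => simp
  | cons a t ih =>
    intro c
    simp only [List.foldl_cons, List.countP_cons, ih]
    cases h : PySem.Set.contains s (a - 1) <;> simp [h] <;> push_cast <;> omega

-- B's loop counts the adjacent pairs with a gap, on top of the initial 1.
theorem foldB_countP : ∀ (l : List (Int × Int)) (c : Int),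
    l.foldl (fun rc p => if p.2 - p.1 > 1 then rc + 1 else rc) c
      = c + (l.countP (fun p => decide (p.2 - p.1 > 1)) : Int) := by
  intro l
  induction l with
  | nil => simp
  | cons a t ih =>
    intro c
    simp only [List.foldl_cons, List.countP_cons, ih]
    by_cases h : a.2 - a.1 > 1 <;> simp [h] <;> push_cast <;> omega

-- Core combinatorial fact: on a strictly increasing nonempty list, the number of
-- elements without a predecessor in the list is 1 + the number of adjacent gaps > 1.
theorem starts_eq_gaps : ∀ (l : List Int), l.Pairwise (· < ·) → l ≠ [] →
    l.countP (fun x => !decide ((x - 1) ∈ l))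
      = 1 + (l.zip l.tail).countP (fun p => decide (p.2 - p.1 > 1)) := by
  intro l
  induction l with
  | nil => intro _ h; exact absurd rfl h
  | cons a t ih =>
    intro hp _
    match t, ih with
    | [], _ =>
      have : ¬ (a - 1 = a) := by omega
      simp [this]
    | b :: t', ih =>
      have hp' : (b :: t').Pairwise (· < ·) := hp.tail
      have hlt : ∀ x ∈ b :: t', a < x := (List.pairwise_cons.1 hp).1
      have hab : a < b := hlt b (by simp)
      have hltb : ∀ x ∈ t', b < x := (List.pairwise_cons.1 hp').1
      have ha : (a - 1) ∉ a :: b :: t' := by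
        intro hmem
        rcases List.mem_cons.1 hmem with h | h
        · omega
        · have := hlt _ h; omega
      have hb' : (b - 1) ∉ b :: t' := by
        intro hmem
        rcases List.mem_cons.1 hmem with h | h
        · omega
        · have := hltb _ h; omega
      have hcong : t'.countP (fun x => !decide ((x - 1) ∈ a :: b :: t'))
          = t'.countP (fun x => !decide ((x - 1) ∈ b :: t')) := by
        apply List.countP_congr
        intro x hx
        have hxb := hltb _ hx
        have hiff : ((x - 1) ∈ a :: b :: t') ↔ ((x - 1) ∈ b :: t') := by
          constructor
          · intro h
            rcases List.mem_cons.1 h with h | h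
            · omega
            · exact h
          · exact List.mem_cons_of_mem _
        simp [hiff]
      have ihv := ih hp' (by simp)
      have hQt : t'.countP (fun x => !decide ((x - 1) ∈ b :: t'))
          = ((b :: t').zip t').countP (fun p => decide (p.2 - p.1 > 1)) := by
        simp only [List.tail_cons, List.countP_cons] at ihv
        simp [hb', List.mem_cons, gt_iff_lt] at ihv ⊢
        omega
      have hbiff : ((b - 1) ∈ a :: b :: t') ↔ b - 1 = a := by
        constructor
        · intro h
          rcases List.mem_cons.1 h with h | h
          · exact h
          · exact absurd h hb'
        · intro h; simp [h]
      simp only [List.tail_cons, List.zip_cons_cons, List.countP_cons]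
      rw [hcong, hQt]
      by_cases hgap : b - 1 = a
      · have hg : ¬ (1 < b - a) := by omega
        simp [ha, hgap, hg]
        omega
      · have hg : (1 < b - a) := by omega
        simp [ha, hbiff, hgap, hg]
        omega

-- ===== VERDICT (by name: the statement is the Claim_ definition above) =====
theorem count_ranges_with_hash_set_spec : Claim_equal_count_ranges_with_hash_set := by
  intro nums _
  unfold Spec_count_ranges_with_hash_set
  by_cases hnil : nums = []
  · subst hnil; rfl
  · unfold count_ranges_with_hash_set count_ranges_with_hash_set_alt
    have hs : PySem.Set.ofList nums ≠ [] := by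
      intro h
      rcases List.exists_mem_of_ne_nil nums hnil with ⟨x, hx⟩
      have : x ∈ PySem.Set.ofList nums := (PySem.Set.mem_ofList nums x).2 hx
      simp [h] at this
    have hperm : (PySem.List.sorted (PySem.Set.ofList nums) (fun x => x) false).Perm
        (PySem.Set.ofList nums) := PySem.List.sorted_perm _ _ _
    have hsune : PySem.List.sorted (PySem.Set.ofList nums) (fun x => x) false ≠ [] := by
      intro h
      have hlen := hperm.length_eq
      rw [h] at hlen
      exact hs (List.length_eq_zero_iff.1 hlen.symm)
    simp only [hnil, if_false, hsune, if_false]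
    rw [foldA_countP, foldB_countP, PySem.List.slice_from_one]
    set s := PySem.Set.ofList nums with hsdef
    set su := PySem.List.sorted s (fun x => x) false with hsudef
    have hc : ∀ x : Int, PySem.Set.contains s x = decide (x ∈ su) := by
      intro x
      by_cases hx : x ∈ su
      · have hxs : x ∈ s := hperm.mem_iff.1 hx
        simp [hx]
        exact hxs
      · have hns : x ∉ s := fun h => hx (hperm.mem_iff.2 h)
        simp [hx]
        exact hns
    have hcnt : s.countP (fun num => !PySem.Set.contains s (num - 1))
        = su.countP (fun x => !decide ((x - 1) ∈ su)) := by
      calc s.countP (fun num => !PySem.Set.contains s (num - 1))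
          = s.countP (fun x => !decide ((x - 1) ∈ su)) := by
            apply List.countP_congr; intro x _; rw [hc]
        _ = su.countP (fun x => !decide ((x - 1) ∈ su)) := (hperm.countP_eq _).symm
    have hsorted : su.Pairwise (· < ·) := by
      have := PySem.List.sorted_ofList_pairwise_lt (xs := nums)
      simpa [hsudef, hsdef] using this
    rw [hcnt, starts_eq_gaps su hsorted hsune]
    push_cast
    ring
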